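-- pv_equiv track=rewrite | github.com/iitian-founder/NOVUS-FinLLM | core/tools.py | _fuzzy_get
-- ===== SOURCE A (Python) =====
-- def _fuzzy_get(data: dict, key: str):
--     """Try exact match, then NBSP-normalized, then case-insensitive substring match."""
--     if key in data:
--         return data[key]
--     # Normalize: strip NBSP and trailing '+'
--     def _norm(s):
--         return s.replace('\xa0', ' ').rstrip('+').strip().lower()
--     key_norm = _norm(key)
--     for k, v in data.items():
--         k_norm = _norm(k)
--         if key_norm == k_norm:
--             return v
--     for k, v in data.items():
--         k_norm = _norm(k)
--         if key_norm in k_norm or k_norm in key_norm: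
--             return v
--     return None
-- ===== SOURCE B (Python) =====
-- def _fuzzy_get(data: dict, key: str):
--     """Exact match fast path, then a single pass: return eagerly on a
--     normalized-equal key, else remember the first substring candidate."""
--     if key in data:
--         return data[key]
--
--     def _norm(s):
--         return s.replace('\xa0', ' ').rstrip('+').strip().lower()
--
--     key_norm = _norm(key)
--     candidate = None
--     for k, v in data.items():
--         k_norm = _norm(k)
--         if k_norm == key_norm:
--             return v
--         if candidate is None and (key_norm in k_norm or k_norm in key_norm):
--             candidate = v
--     return candidate
-- ===== Notes on version B (the rewrite author's own statement) =====
-- stated objective: simpler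
-- what changed: Replaces A's two separate full passes (normalized-equality pass, then substring pass) by one pass that normalizes each key once, returns eagerly on a normalized match and keeps the first substring candidate in an accumulator.
import Mathlib
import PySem

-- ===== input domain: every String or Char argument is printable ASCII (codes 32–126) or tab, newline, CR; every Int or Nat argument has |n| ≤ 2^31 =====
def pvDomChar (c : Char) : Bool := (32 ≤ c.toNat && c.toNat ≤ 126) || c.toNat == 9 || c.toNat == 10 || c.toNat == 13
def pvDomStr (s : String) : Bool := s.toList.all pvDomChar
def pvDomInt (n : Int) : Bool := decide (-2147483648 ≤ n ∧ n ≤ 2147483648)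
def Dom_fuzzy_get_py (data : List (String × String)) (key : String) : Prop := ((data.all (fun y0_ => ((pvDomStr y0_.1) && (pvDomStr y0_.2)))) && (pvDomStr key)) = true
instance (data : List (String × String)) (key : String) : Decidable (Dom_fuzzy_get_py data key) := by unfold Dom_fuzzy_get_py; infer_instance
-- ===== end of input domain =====

-- B replaces A's two separate normalization passes by one pass that returns eagerly
-- on a normalized match and records the first substring candidate (objective: simpler).

-- ===== PORT A =====
-- s.rstrip('+'): drop trailing '+' characters (exact: rstrip with an explicit char set)
def pvRstripPlus (s : String) : String :=
  String.ofList ((s.toList.reverse.dropWhile (· == '+')).reverse)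

-- key_norm in k_norm or k_norm in key_norm (the shared substring test)
def pvSubHit (keyNorm kNorm : String) : Bool :=
  PySem.Str.isIn keyNorm kNorm || PySem.Str.isIn kNorm keyNorm

-- _norm(s) = s.replace('\xa0', ' ').rstrip('+').strip().lower()
def pvNorm (s : String) : String :=
  PySem.Str.lower (PySem.Str.strip (pvRstripPlus (PySem.Str.replace s "\u00A0" " ")))

def fuzzy_get_py (data : List (String × String)) (key : String) : Option String :=
  match data.find? (fun p => p.1 == key) with          -- if key in data: return data[key]
  | some p => some p.2
  | none =>
    let keyNorm := pvNorm key
    match data.find? (fun p => pvNorm p.1 == keyNorm) with   -- first loop: normalized equality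
    | some p => some p.2
    | none =>
      match data.find? (fun p => pvSubHit keyNorm (pvNorm p.1)) with   -- second loop: substring either way
      | some p => some p.2
      | none => none

-- ===== PORT B =====
-- the single loop of Source B: eager return on normalized equality, accumulator holds
-- the first substring candidate
def fuzzyLoopB (keyNorm : String) (cand : Option String) :
    List (String × String) → Option String
  | [] => cand
  | (k, v) :: rest =>
    let kNorm := pvNorm k
    if kNorm == keyNorm then some v
    else
      fuzzyLoopB keyNorm
        (if cand.isNone && pvSubHit keyNorm kNorm then some v else cand) rest

def fuzzy_get_py_alt (data : List (String × String)) (key : String) : Option String :=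
  match data.find? (fun p => p.1 == key) with          -- if key in data: return data[key]
  | some p => some p.2
  | none => fuzzyLoopB (pvNorm key) none data

-- ===== PRECONDITION & SPEC =====
def Spec_fuzzy_get_py (data : List (String × String)) (key : String) (out : Option String) : Prop := out = fuzzy_get_py_alt data key
instance (data : List (String × String)) (key : String) (out : Option String) : Decidable (Spec_fuzzy_get_py data key out) := by unfold Spec_fuzzy_get_py; infer_instance

-- ===== CLAIM (what is proved, stated in full; the proofs are below) =====
def Claim_equal_fuzzy_get_py : Prop := ∀ (data : List (String × String)) (key : String), Dom_fuzzy_get_py data key → Spec_fuzzy_get_py data key (fuzzy_get_py data key)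

-- ===== LEMMAS AND PROOFS =====

-- B's loop, run with any pending candidate, equals A's two-pass structure:
-- first normalized-equality match wins; otherwise the candidate, else the
-- first substring match.
theorem fuzzyLoopB_eq (keyNorm : String) (cand : Option String)
    (data : List (String × String)) :
    fuzzyLoopB keyNorm cand data =
      match data.find? (fun p => pvNorm p.1 == keyNorm) with
      | some p => some p.2
      | none =>
        match cand with
        | some c => some c
        | none =>
          (data.find? (fun p => pvSubHit keyNorm (pvNorm p.1))).map Prod.snd := by
  induction data generalizing cand with
  | nil => cases cand <;> simp [fuzzyLoopB]
  | cons hd tl ih =>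
    obtain ⟨k, v⟩ := hd
    by_cases hEq : (pvNorm k == keyNorm) = true
    · simp [fuzzyLoopB, List.find?, hEq]
    · rw [show fuzzyLoopB keyNorm cand ((k, v) :: tl) =
        fuzzyLoopB keyNorm
          (if cand.isNone && pvSubHit keyNorm (pvNorm k) then some v else cand) tl from by
          simp [fuzzyLoopB, hEq]]
      rw [ih]
      cases cand with
      | some c => simp [List.find?, hEq]
      | none =>
        by_cases hSub : pvSubHit keyNorm (pvNorm k) = true
        · simp [List.find?, hEq, hSub]
        · simp [List.find?, hEq, hSub]

-- ===== VERDICT (by name: the statement is the Claim_ definition above) =====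
theorem fuzzy_get_py_spec : Claim_equal_fuzzy_get_py := by
  intro data key _
  unfold Spec_fuzzy_get_py fuzzy_get_py fuzzy_get_py_alt
  cases data.find? (fun p => p.1 == key) with
  | some p => rfl
  | none =>
    simp only [fuzzyLoopB_eq]
    cases data.find? (fun p => pvNorm p.1 == pvNorm key) with
    | some p => rfl
    | none =>
      cases data.find? (fun p => pvSubHit (pvNorm key) (pvNorm p.1)) <;> rfl
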